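-- pv_equiv track=rewrite | github.com/kunaltyagi/SDES | quiz/python/quiz3.py | strip_string
-- ===== SOURCE A (Python) =====
-- def strip_string(arg):
--     oldchar = ''
--     newstr=''
--     for char in arg:
--         if not char.isalnum() and char != '/':
--             if oldchar == '_':
--                 continue
--             else:
--                 char = '_'
--                 oldchar = char
--                 newstr += char
--         else:
--             oldchar = char
--             newstr += char
--     return newstr
-- ===== SOURCE B (Python) =====
-- def strip_string(arg):
--     # two-pass, stateless: map separators to '_', then drop '_' preceded by '_'
--     mapped = ['_' if (not c.isalnum() and c != '/') else c for c in arg]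
--     return ''.join(c for p, c in zip([''] + mapped, mapped)
--                    if not (c == '_' and p == '_'))
-- ===== Notes on version B (the rewrite author's own statement) =====
-- stated objective: simpler
-- what changed: Replaces A's stateful per-character loop with oldchar bookkeeping by a stateless two-pass decomposition: map every separator character to an underscore, then drop each underscore whose predecessor is an underscore via a zip with the shifted list.
import Mathlib
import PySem

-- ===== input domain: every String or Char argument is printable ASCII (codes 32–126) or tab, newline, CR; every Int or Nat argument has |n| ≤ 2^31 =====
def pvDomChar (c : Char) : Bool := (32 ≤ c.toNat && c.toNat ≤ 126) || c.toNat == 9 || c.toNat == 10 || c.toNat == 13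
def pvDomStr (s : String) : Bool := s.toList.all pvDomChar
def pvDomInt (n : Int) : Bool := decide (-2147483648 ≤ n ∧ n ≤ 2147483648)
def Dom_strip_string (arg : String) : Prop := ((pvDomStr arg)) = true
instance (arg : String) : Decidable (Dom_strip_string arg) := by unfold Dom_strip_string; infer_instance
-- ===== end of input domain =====

-- B replaces A's per-character oldchar bookkeeping by a stateless two-pass map-then-collapse decomposition (objective: simpler).

-- ===== PORT A =====
-- oldchar is modelled as List Char ('' = []); newstr accumulated as List Char.
def stripLoopA : List Char → List Char → List Char → List Char
  | [], _, newstr => newstr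
  | c :: rest, oldchar, newstr =>
    if !(PySem.Chars.isalnum c) && c != '/' then
      if oldchar = ['_'] then stripLoopA rest oldchar newstr
      else stripLoopA rest ['_'] (newstr ++ ['_'])
    else stripLoopA rest [c] (newstr ++ [c])

def strip_string (arg : String) : String :=
  String.mk (stripLoopA arg.toList [] [])

-- ===== PORT B =====
def strip_string_alt (arg : String) : String :=
  let mapped := arg.toList.map (fun c => if !(PySem.Chars.isalnum c) && c != '/' then '_' else c)
  -- zip([''] + mapped, mapped): the '' sentinel is modelled as none, real chars as some
  String.mk ((((((none : Option Char) :: mapped.map some).zip mapped).filter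
      (fun pc => !(pc.2 == '_' && pc.1 == some '_'))).map Prod.snd))

-- ===== PRECONDITION & SPEC =====
def Spec_strip_string (arg : String) (out : String) : Prop := out = strip_string_alt arg
instance (arg : String) (out : String) : Decidable (Spec_strip_string arg out) := by unfold Spec_strip_string; infer_instance

-- ===== CLAIM (what is proved, stated in full; the proofs are below) =====
def Claim_equal_strip_string : Prop := ∀ (arg : String), Dom_strip_string arg → Spec_strip_string arg (strip_string arg)

-- ===== LEMMAS AND PROOFS =====

-- reference collapse over the mapped list, parameterised by "previous emitted/seen char was '_'"
def pvCollapse : List Char → Bool → List Char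
  | [], _ => []
  | c :: rest, u =>
    if c = '_' ∧ u then pvCollapse rest true
    else c :: pvCollapse rest (c = '_')

def pvSep (c : Char) : Bool := !(PySem.Chars.isalnum c) && c != '/'

def pvMap (c : Char) : Char := if pvSep c then '_' else c

lemma pvKept_ne_underscore {c : Char} (h : pvSep c = false) : c ≠ '_' := by
  intro hc; subst hc
  rw [(by decide : pvSep '_' = true)] at h
  cases h

lemma stripLoopA_eq (cs : List Char) (old acc : List Char) :
    stripLoopA cs old acc = acc ++ pvCollapse (cs.map pvMap) (old = ['_']) := by
  induction cs generalizing old acc with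
  | nil => simp [stripLoopA, pvCollapse]
  | cons c rest ih =>
    by_cases hs : pvSep c = true
    · simp only [stripLoopA, pvSep] at hs ⊢
      rw [hs]
      simp only [if_true, List.map_cons]
      have hm : pvMap c = '_' := by simp [pvMap, pvSep, hs]
      by_cases ho : old = ['_']
      · simp [ho, ih, pvCollapse, hm]
      · simp [ho, ih, pvCollapse, hm]
    · have hs' : pvSep c = false := by simpa using hs
      simp only [stripLoopA, pvSep] at hs' ⊢
      rw [hs']
      simp only [Bool.false_eq_true, if_false, List.map_cons]
      have hm : pvMap c = c := by simp [pvMap, pvSep, hs']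
      have hne : c ≠ '_' := pvKept_ne_underscore (by simpa [pvSep] using hs')
      have holdc : ([c] = ['_']) = False := by simp [hne]
      rw [ih]
      simp [pvCollapse, hm, hne, holdc]

lemma zipFilter_eq (m : List Char) (p : Option Char) :
    ((( (p :: m.map some).zip m).filter
        (fun pc => !(pc.2 == '_' && pc.1 == some '_'))).map Prod.snd)
      = pvCollapse m (p == some '_') := by
  induction m generalizing p with
  | nil => simp [pvCollapse]
  | cons c rest ih =>
    rw [List.map_cons, List.zip_cons_cons]
    simp only [List.filter_cons]
    by_cases hc : c = '_' ∧ p = some '_'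
    · obtain ⟨h1, h2⟩ := hc
      subst h1; subst h2
      rw [if_neg (by simp), ih]
      simp [pvCollapse]
    · have hcond : (!(c == '_' && p == some '_')) = true := by
        simp only [Bool.not_eq_eq_eq_not, Bool.not_true, Bool.and_eq_false_iff]
        by_cases h1 : c = '_'
        · right; simp; intro h2; exact hc ⟨h1, h2⟩
        · left; simp [h1]
      rw [if_pos hcond, List.map_cons, ih]
      by_cases h1 : c = '_'
      · have h2 : p ≠ some '_' := fun h => hc ⟨h1, h⟩
        have hp : (p == some '_') = false := by simp [h2]
        subst h1
        simp [pvCollapse, hp]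
      · have hcb : (c == '_') = false := by simp [h1]
        simp [pvCollapse, h1, hcb]

-- ===== VERDICT (by name: the statement is the Claim_ definition above) =====
theorem strip_string_spec : Claim_equal_strip_string := by
  intro arg _
  unfold Spec_strip_string strip_string strip_string_alt
  rw [stripLoopA_eq]
  have hm : (fun c => if !(PySem.Chars.isalnum c) && c != '/' then '_' else c) = pvMap := rfl
  simp only [hm, zipFilter_eq]
  norm_num
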